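-- pv_equiv track=rewrite | github.com/CrySamuel/Recursao | Exercise 5/Exercise_5.py | pertence_a_S
-- ===== SOURCE A (Python) =====
-- def pertence_a_S(s):
--     if s == "a" or s == "b":
--         return True
--     if s.startswith("a") and pertence_a_S(s[1:]):
--         return True
--     if s.endswith("b") and pertence_a_S(s[:-1]):
--         return True
--     return False
-- ===== SOURCE B (Python) =====
-- def pertence_a_S(s):
--     if not s:
--         return False
--     i = 0
--     n = len(s)
--     while i < n and s[i] == 'a':
--         i += 1
--     while i < n and s[i] == 'b':
--         i += 1
--     return i == n
-- ===== Notes on version B (the rewrite author's own statement) =====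
-- stated objective: faster
-- what changed: Replaces the double-branching recursion (peel first 'a' / last 'b' with string slicing) by a single linear index scan skipping the leading a-run then the b-run and checking the end was reached.
import Mathlib
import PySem

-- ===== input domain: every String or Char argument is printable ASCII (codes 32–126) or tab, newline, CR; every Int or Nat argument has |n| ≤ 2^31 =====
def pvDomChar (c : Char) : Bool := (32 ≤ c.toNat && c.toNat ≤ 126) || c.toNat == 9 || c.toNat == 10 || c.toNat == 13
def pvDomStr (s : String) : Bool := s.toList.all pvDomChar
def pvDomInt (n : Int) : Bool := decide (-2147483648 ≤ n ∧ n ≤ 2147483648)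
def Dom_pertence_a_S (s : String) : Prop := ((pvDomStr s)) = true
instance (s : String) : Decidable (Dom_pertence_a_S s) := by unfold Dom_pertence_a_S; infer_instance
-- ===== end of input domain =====

-- B replaces A's double-branching recursion by one linear scan (measured faster); both total, return values only.

-- ===== PORT A =====
-- Literal port of A's recursion over the characters: s == "a"/"b"; startswith "a" and recurse
-- on s[1:] (the tail); endswith "b" and recurse on s[:-1] (dropLast). On "" every branch of A
-- fails and it returns False, which is the [] case here.
def pertenceGo : List Char → Bool
  | [] => false
  | c :: rest =>
    if c :: rest = ['a'] ∨ c :: rest = ['b'] then true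
    else if c = 'a' && pertenceGo rest then true
    else if (c :: rest).getLast? = some 'b' && pertenceGo ((c :: rest).dropLast) then true
    else false
termination_by l => l.length
decreasing_by
  · simp
  · simp [List.length_dropLast]

def pertence_a_S (s : String) : Bool := pertenceGo s.toList

-- ===== PORT B =====
-- Port of Source B: the two index-advancing while loops become two run-skipping recursions over the
-- same characters; "i == n" becomes "nothing left".
def skipChar (c : Char) : List Char → List Char
  | [] => []
  | x :: xs => if x = c then skipChar c xs else x :: xs

def pertence_a_S_alt (s : String) : Bool :=
  let l := s.toList
  if l = [] then false
  else skipChar 'b' (skipChar 'a' l) = []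

-- ===== PRECONDITION & SPEC =====
def Spec_pertence_a_S (s : String) (out : Bool) : Prop := out = pertence_a_S_alt s
instance (s : String) (out : Bool) : Decidable (Spec_pertence_a_S s out) := by unfold Spec_pertence_a_S; infer_instance

-- ===== CLAIM (what is proved, stated in full; the proofs are below) =====
def Claim_equal_pertence_a_S : Prop := ∀ (s : String), Dom_pertence_a_S s → Spec_pertence_a_S s (pertence_a_S s)

-- ===== LEMMAS AND PROOFS =====

-- B's core on a list, as the list-level function the String port computes.
def altGo (l : List Char) : Bool :=
  if l = [] then false else skipChar 'b' (skipChar 'a' l) = []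

theorem skipChar_eq_nil {c : Char} {xs : List Char} :
    skipChar c xs = [] ↔ ∀ x ∈ xs, x = c := by
  induction xs with
  | nil => simp [skipChar]
  | cons x xs ih =>
    by_cases h : x = c <;> simp [skipChar, h, ih]

theorem skipChar_cons_eq (c : Char) (xs : List Char) :
    skipChar c (c :: xs) = skipChar c xs := by simp [skipChar]

theorem skipChar_cons_ne {c x : Char} (h : x ≠ c) (xs : List Char) :
    skipChar c (x :: xs) = x :: xs := by simp [skipChar, h]

-- a*b* is closed under appending a 'b'.
theorem srun_append_b {l : List Char}
    (h : skipChar 'b' (skipChar 'a' l) = []) :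
    skipChar 'b' (skipChar 'a' (l ++ ['b'])) = [] := by
  induction l with
  | nil => decide
  | cons x xs ih =>
    by_cases hx : x = 'a'
    · subst hx
      rw [List.cons_append, skipChar_cons_eq] at *
      exact ih h
    · rw [List.cons_append, skipChar_cons_ne hx] at *
      by_cases hb : x = 'b'
      · subst hb
        rw [skipChar_cons_eq] at *
        rw [skipChar_eq_nil] at h ⊢
        intro y hy
        rcases List.mem_append.1 hy with hy | hy
        · exact h y hy
        · simpa using hy
      · rw [skipChar_cons_ne hb] at h
        simp at h

-- all-'b' via last element: xs ≠ [] → (xs all 'b' ↔ last = 'b' ∧ dropLast all 'b')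
theorem skipChar_b_last {xs : List Char} (h : xs ≠ []) :
    (skipChar 'b' xs = []) ↔ (xs.getLast? = some 'b' ∧ skipChar 'b' xs.dropLast = []) := by
  rw [skipChar_eq_nil, skipChar_eq_nil]
  constructor
  · intro hall
    refine ⟨?_, fun x hx => hall x (List.dropLast_subset xs hx)⟩
    rw [List.getLast?_eq_some_getLast h]
    exact congrArg some (hall _ (List.getLast_mem h))
  · rintro ⟨hlast, hall⟩ x hx
    have hx' : x ∈ xs.dropLast ++ [xs.getLast h] := by
      rwa [List.dropLast_append_getLast h]
    rcases List.mem_append.1 hx' with hx' | hx'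
    · exact hall x hx'
    · simp at hx'
      subst hx'
      rw [List.getLast?_eq_some_getLast h] at hlast
      exact Option.some.inj hlast

theorem altGo_drop_imp {rest : List Char} (hrne : rest ≠ [])
    (hgb : rest.getLast? = some 'b')
    (h : skipChar 'b' (skipChar 'a' rest.dropLast) = []) :
    skipChar 'b' (skipChar 'a' rest) = [] := by
  have hglast : rest.getLast hrne = 'b' := by
    rw [List.getLast?_eq_some_getLast hrne] at hgb
    exact Option.some.inj hgb
  have hres : rest.dropLast ++ ['b'] = rest := by
    conv_rhs => rw [← List.dropLast_append_getLast hrne, hglast]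
  rw [← hres]
  exact srun_append_b h

theorem pertenceGo_eq_altGo : ∀ l : List Char, pertenceGo l = altGo l := by
  intro l
  induction hn : l.length using Nat.strong_induction_on generalizing l with
  | _ n ih =>
    subst hn
    cases l with
    | nil => simp [pertenceGo, altGo]
    | cons c rest =>
      have IHrest : pertenceGo rest = altGo rest :=
        ih rest.length (by simp) rest rfl
      have IHdrop : pertenceGo ((c :: rest).dropLast) = altGo ((c :: rest).dropLast) :=
        ih ((c :: rest).dropLast).length (by simp [List.length_dropLast]) _ rfl
      by_cases hsing : c :: rest = ['a'] ∨ c :: rest = ['b']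
      · rcases hsing with h | h <;> (rw [h, pertenceGo]; simp [altGo, skipChar])
      · rw [pertenceGo, if_neg hsing, IHrest, IHdrop]
        by_cases hca : c = 'a'
        · -- leading 'a': A tries the tail; the endswith-'b' branch never adds strings
          subst hca
          have hrne : rest ≠ [] := fun h => hsing (Or.inl (by rw [h]))
          obtain ⟨r, rs, hrr⟩ := List.exists_cons_of_ne_nil hrne
          have hdl : ('a' :: rest).dropLast = 'a' :: rest.dropLast := by rw [hrr]; rfl
          have hgl : ('a' :: rest).getLast? = rest.getLast? := by rw [hrr]; simp
          have haltA : altGo ('a' :: rest) = altGo rest := by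
            simp [altGo, skipChar, hrne]
          rw [hdl, hgl, haltA]
          cases hR : altGo rest with
          | true => simp
          | false =>
            by_cases hgb : rest.getLast? = some 'b'
            · cases h2 : altGo ('a' :: rest.dropLast) with
              | false => simp [hgb]
              | true =>
                exfalso
                have h3 : skipChar 'b' (skipChar 'a' rest.dropLast) = [] := by
                  simpa [altGo, skipChar] using h2
                have h4 := altGo_drop_imp hrne hgb h3
                simp [altGo, hrne, h4] at hR
            · simp [hgb]
        · by_cases hcb : c = 'b'
          · -- leading 'b': only the endswith-'b' branch can fire; it strips b's off the end
            subst hcb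
            have hrne : rest ≠ [] := fun h => hsing (Or.inr (by rw [h]))
            obtain ⟨r, rs, hrr⟩ := List.exists_cons_of_ne_nil hrne
            have hdl : ('b' :: rest).dropLast = 'b' :: rest.dropLast := by rw [hrr]; rfl
            have hgl : ('b' :: rest).getLast? = rest.getLast? := by rw [hrr]; simp
            have hba : ('b' : Char) ≠ 'a' := by decide
            have haltb1 : altGo ('b' :: rest) = decide (skipChar 'b' rest = []) := by
              simp [altGo, skipChar, hba]
            have haltb2 : altGo ('b' :: rest.dropLast) = decide (skipChar 'b' rest.dropLast = []) := by
              simp [altGo, skipChar, hba]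
            rw [hdl, hgl, haltb1, haltb2]
            by_cases hP : skipChar 'b' rest = []
            · obtain ⟨h1, h2⟩ := (skipChar_b_last hrne).1 hP
              simp [hP, h1, h2, hba]
            · by_cases h1 : rest.getLast? = some 'b'
              · have h2 : skipChar 'b' rest.dropLast ≠ [] :=
                  fun h2 => hP ((skipChar_b_last hrne).2 ⟨h1, h2⟩)
                simp [hP, h1, h2, hba]
              · simp [hP, h1, hba]
          · -- first char outside {a,b}: every branch fails on both sides
            cases rest with
            | nil => simp [altGo, skipChar, hca, hcb]
            | cons r rs => simp [altGo, skipChar, hca, hcb]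

-- ===== VERDICT (by name: the statement is the Claim_ definition above) =====
theorem pertence_a_S_spec : Claim_equal_pertence_a_S := by
  intro s _
  unfold Spec_pertence_a_S pertence_a_S pertence_a_S_alt
  have := pertenceGo_eq_altGo s.toList
  simpa [altGo] using this
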